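-- pv_equiv track=rewrite | github.com/BitPusher16/han-hoppe | han_hoppe/tile_utils.py | x_y_lod_to_qk
-- ===== SOURCE A (Python) =====
-- def x_y_lod_to_qk(x, y, lod):
--     qk = ''
--     for i in range(lod, 0, -1):
--         digit = 0
--         mask = 1 << (i - 1)
--         if (x & mask) != 0:
--             digit += 1
--         if (y & mask) != 0:
--             digit += 2
--         qk += str(digit)
--     return qk
-- ===== SOURCE B (Python) =====
-- def x_y_lod_to_qk(x, y, lod):
--     # Mask off the low lod bits, render both coordinates as fixed-width binary
--     # strings once, then pair the bits per level: digit = x-bit + 2*y-bit.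
--     if lod <= 0:
--         return ''
--     m = (1 << lod) - 1
--     xb = format(x & m, 'b').zfill(lod)
--     yb = format(y & m, 'b').zfill(lod)
--     digits = []
--     for i in range(lod):
--         digits.append(str(ord(xb[i]) - 48 + 2 * (ord(yb[i]) - 48)))
--     return ''.join(digits)
-- ===== Notes on version B (the rewrite author's own statement) =====
-- stated objective: faster
-- what changed: A loops over levels building a fresh big-integer mask 1<<(i-1) and bit-testing x and y per level; B masks the low lod bits once, renders both coordinates as fixed-width binary strings, and combines the two bit characters of each level into the quadkey digit.
import Mathlib
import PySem

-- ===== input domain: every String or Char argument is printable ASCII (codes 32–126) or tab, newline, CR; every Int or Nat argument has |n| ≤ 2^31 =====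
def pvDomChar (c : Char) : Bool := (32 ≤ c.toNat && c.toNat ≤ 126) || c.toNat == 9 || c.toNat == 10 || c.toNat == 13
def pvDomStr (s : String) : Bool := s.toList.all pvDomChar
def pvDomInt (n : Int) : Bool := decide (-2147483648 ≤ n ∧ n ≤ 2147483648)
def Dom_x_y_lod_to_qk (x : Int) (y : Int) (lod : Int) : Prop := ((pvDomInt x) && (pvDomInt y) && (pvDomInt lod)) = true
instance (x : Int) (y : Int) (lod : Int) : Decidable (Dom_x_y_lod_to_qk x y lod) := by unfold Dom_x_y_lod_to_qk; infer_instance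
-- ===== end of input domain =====

-- Equivalence of two quadkey builders: A loops over levels testing bit lod-i of x and y with a
-- fresh mask per level; B renders the masked coordinates as fixed-width binary strings once and
-- combines the two bit characters of each level into a digit (objective: faster, O(lod) vs A's
-- quadratic big-integer mask work).


-- ===== PORT A =====
-- one loop over i = lod..1; the shift count i-1 is ≥ 0 in the loop, so `.toNat` is exact
def x_y_lod_to_qk (x : Int) (y : Int) (lod : Int) : String :=
  String.ofList <|
    (PySem.List.pyRange lod 0 (-1)).foldl (fun qk i =>
      let digit : Int := 0
      let mask : Int := (1 : Int) <<< (((i - 1).toNat : Nat) : Int)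
      let digit := if PySem.Int.band x mask ≠ 0 then digit + 1 else digit
      let digit := if PySem.Int.band y mask ≠ 0 then digit + 2 else digit
      qk ++ PySem.Int.toChars digit) []

-- ===== PORT B =====
-- binary strings are ported as List Char; `''.join` is `flatten`; `ord c` is `c.toNat`;
-- the index i of `range(lod)` is in range for both strings, so `pyGetD`'s default is never read
def x_y_lod_to_qk_alt (x : Int) (y : Int) (lod : Int) : String :=
  if lod ≤ 0 then ""
  else
    let m : Int := (1 : Int) <<< ((lod.toNat : Nat) : Int) - 1
    let xb := PySem.Chars.zfill (PySem.Int.toBinChars (PySem.Int.band x m)) lod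
    let yb := PySem.Chars.zfill (PySem.Int.toBinChars (PySem.Int.band y m)) lod
    let digits := (PySem.List.pyRange 0 lod 1).foldl (fun ds i =>
      ds ++ [PySem.Int.toChars
        (((PySem.List.pyGetD xb i ' ').toNat : Int) - 48 +
          2 * (((PySem.List.pyGetD yb i ' ').toNat : Int) - 48))]) []
    String.ofList digits.flatten

-- ===== PRECONDITION & SPEC =====
def Spec_x_y_lod_to_qk (x : Int) (y : Int) (lod : Int) (out : String) : Prop := out = x_y_lod_to_qk_alt x y lod
instance (x : Int) (y : Int) (lod : Int) (out : String) : Decidable (Spec_x_y_lod_to_qk x y lod out) := by unfold Spec_x_y_lod_to_qk; infer_instance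

-- ===== CLAIM (what is proved, stated in full; the proofs are below) =====
def Claim_equal_x_y_lod_to_qk : Prop := ∀ (x : Int) (y : Int) (lod : Int), Dom_x_y_lod_to_qk x y lod → Spec_x_y_lod_to_qk x y lod (x_y_lod_to_qk x y lod)

-- ===== LEMMAS AND PROOFS =====

-- bit m of x (two's complement), as 0 or 1
def pvBit (x : Int) (m : Nat) : Int := (x / (2 : Int) ^ m) % 2
-- the quadkey digit at level m
def pvD (x y : Int) (m : Nat) : Int := pvBit x m + 2 * pvBit y m
-- digits o+k-1 .. o, highest first (what A builds for o = 0)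
def pvW (x y : Int) (o : Nat) : Nat → List Char
  | 0 => []
  | k + 1 => PySem.Int.toChars (pvD x y (o + k)) ++ pvW x y o k

theorem pvBit01 (x : Int) (m : Nat) : pvBit x m = 0 ∨ pvBit x m = 1 := by
  unfold pvBit; omega

theorem pv_band_two_pow (x : Int) (m : Nat) :
    (PySem.Int.band x ((2 : Int) ^ m) ≠ 0) ↔ pvBit x m = 1 := by
  have h2n : (0:ℕ) < 2 ^ m := by positivity
  have hcast : ((2:Int) ^ m) = ((2 ^ m : ℕ) : Int) := by push_cast; ring
  unfold pvBit
  by_cases hx : 0 ≤ x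
  · obtain ⟨n, rfl⟩ : ∃ n : ℕ, x = ↑n := ⟨x.toNat, (Int.toNat_of_nonneg hx).symm⟩
    rw [hcast, PySem.Int.band_natCast, Nat.and_two_pow, Nat.testBit_eq_decide_div_mod_eq]
    have hdiv : (↑n / ((2 ^ m : ℕ) : Int)) = ((n / 2 ^ m : ℕ) : Int) := by
      exact_mod_cast (Int.natCast_div n (2 ^ m)).symm
    rw [hdiv]
    generalize n / 2 ^ m = a
    rcases Nat.mod_two_eq_zero_or_one a with h | h
    · rw [h]
      norm_num
      omega
    · rw [h]
      have h2 : ((2 ^ m : ℕ) : Int) ≠ 0 := by exact_mod_cast h2n.ne'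
      norm_num [h2]
      omega
  · rw [not_le] at hx
    have hx1 : 0 ≤ -x - 1 := by omega
    obtain ⟨k, hk⟩ : ∃ k : ℕ, -x - 1 = ↑k := ⟨(-x-1).toNat, (Int.toNat_of_nonneg hx1).symm⟩
    have hxk : x = -↑k - 1 := by omega
    have hband : PySem.Int.band x ((2:Int) ^ m) = ↑(2 ^ m - (2 ^ m &&& k)) := by
      unfold PySem.Int.band
      have h1 : ((2:Int) ^ m).toNat = 2 ^ m := by rw [hcast, Int.toNat_natCast]
      rw [if_neg (by omega), if_pos (by positivity), hk, h1, Int.toNat_natCast]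
    set b := k / 2 ^ m with hb
    set r := k % 2 ^ m with hr
    have hrlt : r < 2 ^ m := Nat.mod_lt _ h2n
    have hkbr : k = b * 2 ^ m + r := by rw [hb, hr, Nat.mul_comm]; exact (Nat.div_add_mod k (2 ^ m)).symm
    have hdiv : x / (2:Int) ^ m = -↑b - 1 := by
      have hxe : x = ((2:Int)^m - ↑r - 1) + (-↑b - 1) * (2:Int) ^ m := by
        rw [hxk]; push_cast [hkbr]; ring
      rw [hxe, Int.add_mul_ediv_right _ _ (by positivity), Int.ediv_eq_zero_of_lt (by omega) (by omega)]
      ring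
    rw [hband, hdiv, Nat.two_pow_and, Nat.testBit_eq_decide_div_mod_eq, ← hb]
    rcases Nat.mod_two_eq_zero_or_one b with h | h <;> simp [h] <;> omega

-- A's loop body computes the digit pvD
theorem pvA_digit (x y i : Int) :
    (let digit : Int := 0
     let mask : Int := (1 : Int) <<< (((i - 1).toNat : Nat) : Int)
     let digit := if PySem.Int.band x mask ≠ 0 then digit + 1 else digit
     if PySem.Int.band y mask ≠ 0 then digit + 2 else digit) = pvD x y (i - 1).toNat := by
  have hbx := pvBit01 x (i - 1).toNat
  have hby := pvBit01 y (i - 1).toNat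
  have hmx := pv_band_two_pow x (i - 1).toNat
  have hmy := pv_band_two_pow y (i - 1).toNat
  simp only [Int.shiftLeft_natCast_right, Int.shiftLeft_eq, one_mul]
  unfold pvD
  simp only [hmx, hmy]
  split_ifs with h1 h2 h2 <;> omega

-- A's fold appends the digits, highest level first
theorem pvA_fold (x y : Int) (k : Nat) (acc : List Char) :
    (PySem.List.pyRange (k : Int) 0 (-1)).foldl (fun qk i =>
      let digit : Int := 0
      let mask : Int := (1 : Int) <<< (((i - 1).toNat : Nat) : Int)
      let digit := if PySem.Int.band x mask ≠ 0 then digit + 1 else digit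
      let digit := if PySem.Int.band y mask ≠ 0 then digit + 2 else digit
      qk ++ PySem.Int.toChars digit) acc = acc ++ pvW x y 0 k := by
  induction k generalizing acc with
  | zero => rw [PySem.List.pyRange_neg_one_eq_nil (by omega)]; simp [pvW]
  | succ k ih =>
    rw [PySem.List.pyRange_neg_one_cons (by push_cast; omega), List.foldl_cons]
    have hstep := pvA_digit x y ((k + 1 : Nat) : Int)
    simp only at hstep ⊢
    rw [hstep]
    have hcast : ((k + 1 : Nat) : Int) - 1 = (k : Int) := by push_cast; ring
    rw [hcast, ih]
    have hnat : ((k : Int)).toNat = k := by omega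
    rw [hnat]
    show acc ++ PySem.Int.toChars (pvD x y k) ++ pvW x y 0 k = acc ++ pvW x y 0 (k + 1)
    simp [pvW, List.append_assoc]

-- binary rendering of a Nat, most significant bit first, no leading zeros (what format(v,'b') builds)
def pvMyBin (n : Nat) : List Char :=
  if n < 2 then [n.digitChar] else pvMyBin (n / 2) ++ [(n % 2).digitChar]
decreasing_by exact Nat.div_lt_self (by omega) (by omega)

-- the low L bits of n as characters, most significant first (zero-padded width L)
def pvPad : Nat → Nat → List Char
  | 0, _ => []
  | L + 1, n => pvPad L (n / 2) ++ [(n % 2).digitChar]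

theorem pvMyBin_lt2 (n : Nat) (h : n < 2) : pvMyBin n = [n.digitChar] := by
  rw [pvMyBin, if_pos h]

theorem pvMyBin_ge2 (n : Nat) (h : ¬ n < 2) :
    pvMyBin n = pvMyBin (n / 2) ++ [(n % 2).digitChar] := by
  rw [pvMyBin, if_neg h]

theorem pvMyBin_cons (n : Nat) : ∃ c t, pvMyBin n = c :: t ∧ (c = '0' ∨ c = '1') := by
  induction n using Nat.strong_induction_on with
  | _ n ih =>
    by_cases h : n < 2
    · refine ⟨n.digitChar, [], pvMyBin_lt2 n h, ?_⟩
      interval_cases n <;> simp [Nat.digitChar]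
    · obtain ⟨c, t, hc, hor⟩ := ih (n / 2) (Nat.div_lt_self (by omega) (by omega))
      exact ⟨c, t ++ [(n % 2).digitChar], by rw [pvMyBin_ge2 n h, hc]; rfl, hor⟩

theorem pvToDigitsCore_eq (f n : Nat) (ds : List Char) (h : n < f) :
    Nat.toDigitsCore 2 f n ds = pvMyBin n ++ ds := by
  induction f generalizing n ds with
  | zero => omega
  | succ f ih =>
    rw [Nat.toDigitsCore]
    by_cases h2 : n / 2 = 0
    · rw [if_pos h2, pvMyBin_lt2 n (by omega)]
      have : n % 2 = n := Nat.mod_eq_of_lt (by omega)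
      rw [this]
      rfl
    · rw [if_neg h2, ih (n / 2) _ (by omega), pvMyBin_ge2 n (by omega)]
      simp

theorem pvToDigits_eq (n : Nat) : Nat.toDigits 2 n = pvMyBin n := by
  rw [Nat.toDigits, pvToDigitsCore_eq (n + 1) n [] (by omega), List.append_nil]

theorem pvPad_zero (L : Nat) : pvPad L 0 = List.replicate L '0' := by
  induction L with
  | zero => rfl
  | succ L ih =>
    show pvPad L (0 / 2) ++ [(0 % 2).digitChar] = _
    rw [Nat.zero_div, ih, show ((0:Nat) % 2).digitChar = '0' from rfl, ← List.replicate_succ']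

theorem pvPad_eq (L n : Nat) (h : n < 2 ^ (L + 1)) :
    List.replicate ((L + 1) - (pvMyBin n).length) '0' ++ pvMyBin n = pvPad (L + 1) n := by
  induction L generalizing n with
  | zero =>
    rw [pvMyBin_lt2 n (by omega)]
    show [n.digitChar] = pvPad 0 (n / 2) ++ [(n % 2).digitChar]
    rw [Nat.mod_eq_of_lt (by omega)]
    rfl
  | succ L ih =>
    by_cases hn : n < 2
    · rw [pvMyBin_lt2 n hn]
      show List.replicate (L + 1) '0' ++ [n.digitChar] =
        pvPad (L + 1) (n / 2) ++ [(n % 2).digitChar]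
      rw [Nat.div_eq_of_lt hn, Nat.mod_eq_of_lt hn, pvPad_zero]
    · rw [pvMyBin_ge2 n hn]
      have hdiv : n / 2 < 2 ^ (L + 1) := by
        have : (2:Nat) ^ (L + 1 + 1) = 2 ^ (L + 1) * 2 := by ring
        omega
      have := ih (n / 2) hdiv
      rw [List.length_append, List.length_singleton]
      show List.replicate ((L + 1 + 1) - ((pvMyBin (n / 2)).length + 1)) '0' ++
        (pvMyBin (n / 2) ++ [(n % 2).digitChar]) = pvPad (L + 1) (n / 2) ++ [(n % 2).digitChar]
      rw [← List.append_assoc, show (L + 1 + 1) - ((pvMyBin (n / 2)).length + 1) =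
        (L + 1) - (pvMyBin (n / 2)).length by omega, this]

theorem pvPad_length (L n : Nat) : (pvPad L n).length = L := by
  induction L generalizing n with
  | zero => rfl
  | succ L ih => simp [pvPad, ih]

theorem pvMyBin_length_le (L n : Nat) (h : n < 2 ^ (L + 1)) : (pvMyBin n).length ≤ L + 1 := by
  have h1 := congrArg List.length (pvPad_eq L n h)
  rw [List.length_append, List.length_replicate, pvPad_length] at h1
  omega

theorem pvZfill (n L : Nat) (hL : 0 < L) (h : n < 2 ^ L) :
    PySem.Chars.zfill (pvMyBin n) (L : Int) = pvPad L n := by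
  obtain ⟨L, rfl⟩ : ∃ L', L = L' + 1 := ⟨L - 1, by omega⟩
  have hlen := pvMyBin_length_le L n h
  have hpad := pvPad_eq L n h
  obtain ⟨c, t, hc, hor⟩ := pvMyBin_cons n
  unfold PySem.Chars.zfill
  split_ifs with hw
  · have : (pvMyBin n).length = L + 1 := by exact_mod_cast le_antisymm hlen (by exact_mod_cast hw)
    rw [← hpad, this]
    simp
  · have hsign : ¬(c = '+' ∨ c = '-') := by rcases hor with h1 | h1 <;> simp [h1]
    rw [hc]
    simp only [if_neg hsign, Int.toNat_natCast]
    rw [← hc, hpad]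

theorem pvPad_get (L n i : Nat) (h : i < L) :
    (pvPad L n).getD i ' ' = (n / 2 ^ (L - 1 - i) % 2).digitChar := by
  induction L generalizing n i with
  | zero => omega
  | succ L ih =>
    show (pvPad L (n / 2) ++ [(n % 2).digitChar]).getD i ' ' = _
    by_cases hi : i < L
    · rw [List.getD_append _ _ _ _ (by rw [pvPad_length]; exact hi), ih (n / 2) i hi]
      have hexp : (L - 1 - i) + 1 = L - i := by omega
      have h1 : n / 2 / 2 ^ (L - 1 - i) = n / 2 ^ (L - i) := by
        rw [Nat.div_div_eq_div_mul, ← Nat.pow_succ', show (L - 1 - i).succ = L - i by omega]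
      rw [h1, show L + 1 - 1 - i = L - i by omega]
    · have hi' : i = L := by omega
      subst hi'
      rw [List.getD_append_right _ _ _ _ (by rw [pvPad_length])]
      rw [pvPad_length]
      simp

-- Python's x & (2^L - 1) is x mod 2^L (two's complement)
theorem pvBandMask (z : Int) (L : Nat) :
    PySem.Int.band z ((2 : Int) ^ L - 1) = z % (2 : Int) ^ L := by
  have h2n : (0:ℕ) < 2 ^ L := by positivity
  have hcast : ((2:Int) ^ L - 1) = ((2 ^ L - 1 : ℕ) : Int) := by
    push_cast [h2n]
    ring
  by_cases hz : 0 ≤ z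
  · obtain ⟨n, rfl⟩ : ∃ n : ℕ, z = ↑n := ⟨z.toNat, (Int.toNat_of_nonneg hz).symm⟩
    rw [hcast, PySem.Int.band_natCast, Nat.and_two_pow_sub_one_eq_mod]
    rw [show ((2:Int) ^ L) = ((2 ^ L : ℕ) : Int) by push_cast; ring]
    exact_mod_cast (Int.natCast_emod n (2 ^ L)).symm
  · rw [not_le] at hz
    have hz1 : 0 ≤ -z - 1 := by omega
    obtain ⟨k, hk⟩ : ∃ k : ℕ, -z - 1 = ↑k := ⟨(-z-1).toNat, (Int.toNat_of_nonneg hz1).symm⟩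
    have hzk : z = -↑k - 1 := by omega
    have hband : PySem.Int.band z ((2:Int) ^ L - 1) = ↑((2 ^ L - 1) - ((2 ^ L - 1) &&& k)) := by
      unfold PySem.Int.band
      rw [if_neg (by omega), if_pos (by rw [hcast]; positivity), hk, hcast, Int.toNat_natCast,
        Int.toNat_natCast]
    rw [hband, Nat.and_comm, Nat.and_two_pow_sub_one_eq_mod]
    have h2I : ((2 ^ L : ℕ) : Int) = (2:Int) ^ L := by push_cast; ring
    have hInt : ((2:Int) ^ L) * ((k / 2 ^ L : ℕ) : Int) + ((k % 2 ^ L : ℕ) : Int) = (k : Int) := by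
      exact_mod_cast Nat.div_add_mod k (2 ^ L)
    have hr : k % 2 ^ L < 2 ^ L := Nat.mod_lt _ h2n
    have hzdec : z % (2:Int) ^ L = (2:Int) ^ L - 1 - ((k % 2 ^ L : ℕ) : Int) := by
      rw [hzk, show (-(k:Int) - 1) = ((2:Int) ^ L - 1 - ((k % 2 ^ L : ℕ) : Int)) +
        (-(((k / 2 ^ L : ℕ) : Int)) - 1) * (2:Int) ^ L by linear_combination hInt]
      rw [Int.add_mul_emod_self_right]
      exact Int.emod_eq_of_lt (by omega) (by omega)
    rw [hzdec]
    omega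

-- taking a bit below the mask width commutes with masking
theorem pvModBit (z : Int) (L m : Nat) (h : m < L) :
    pvBit (z % (2 : Int) ^ L) m = pvBit z m := by
  unfold pvBit
  have hdec : z % (2:Int) ^ L = z + (-(z / 2 ^ L) * 2 ^ (L - m)) * 2 ^ m := by
    rw [Int.emod_def]
    have : (2:Int) ^ (L - m) * 2 ^ m = 2 ^ L := by
      rw [← pow_add]
      congr 1
      omega
    linear_combination (z / 2 ^ L) * this
  rw [hdec, Int.add_mul_ediv_right _ _ (by positivity : (0:Int) < 2 ^ m).ne']
  have heven : ∃ u : Int, -(z / 2 ^ L) * 2 ^ (L - m) = 2 * u := by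
    refine ⟨-(z / 2 ^ L) * 2 ^ (L - m - 1), ?_⟩
    rw [show (2:Int) ^ (L - m) = 2 * 2 ^ (L - m - 1) by rw [← pow_succ']; congr 1; omega]
    ring
  obtain ⟨u, hu⟩ := heven
  rw [hu]
  generalize z / (2:Int) ^ m = t
  omega

-- B's per-level digit: two bit characters recombine into the quadkey digit
theorem pvCharDigit (z : Int) (L : Nat) (i : Int) (h0 : 0 ≤ i) (hL : i < (L : Int)) (hLpos : 0 < L) :
    ((PySem.List.pyGetD (pvPad L ((z % (2 : Int) ^ L).toNat)) i ' ').toNat : Int) - 48 =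
      pvBit z ((L : Int) - 1 - i).toNat := by
  have hmod : (0:Int) ≤ z % (2:Int) ^ L := Int.emod_nonneg z (by positivity)
  set n := (z % (2 : Int) ^ L).toNat with hn
  have hcast : (n : Int) = z % (2:Int) ^ L := Int.toNat_of_nonneg hmod
  have hlt : n < 2 ^ L := by
    have := Int.emod_lt_of_pos z (show (0:Int) < 2 ^ L by positivity)
    have h2 : ((2:Int) ^ L) = ((2 ^ L : ℕ) : Int) := by push_cast; ring
    omega
  rw [PySem.List.pyGetD_of_nonneg _ _ h0, pvPad_get L n i.toNat (by omega)]
  set j := L - 1 - i.toNat with hj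
  have hj' : ((L : Int) - 1 - i).toNat = j := by omega
  rw [hj']
  have hb : n / 2 ^ j % 2 < 2 := Nat.mod_lt _ (by omega)
  have hchar : ∀ b : Nat, b < 2 → ((Nat.digitChar b).toNat : Int) - 48 = ↑b := by
    intro b hb2
    interval_cases b <;> decide
  rw [hchar _ hb]
  have hjL : j < L := by omega
  rw [← pvModBit z L j hjL, ← hcast]
  unfold pvBit
  rw [show ((2:Int) ^ j) = ((2 ^ j : ℕ) : Int) by push_cast; ring]
  rw [show ((n:Int) / ((2 ^ j : ℕ) : Int)) = ((n / 2 ^ j : ℕ) : Int) from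
    (Int.natCast_div _ _).symm]
  exact_mod_cast (Int.natCast_emod (n / 2 ^ j) 2).symm

theorem pvW_low (x y : Int) (k o : Nat) :
    pvW x y o (k + 1) = pvW x y (o + 1) k ++ PySem.Int.toChars (pvD x y o) := by
  induction k generalizing o with
  | zero => simp [pvW]
  | succ k ih =>
    show PySem.Int.toChars (pvD x y (o + (k + 1))) ++ pvW x y o (k + 1) = _
    rw [ih]
    have : o + (k + 1) = (o + 1) + k := by omega
    rw [this]
    show PySem.Int.toChars (pvD x y ((o + 1) + k)) ++
      (pvW x y (o + 1) k ++ PySem.Int.toChars (pvD x y o)) = _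
    rw [← List.append_assoc]
    rfl

-- assembling the digits front-to-back over range(lod) yields pvW
theorem pvFlatten (x y : Int) (k o : Nat) :
    (List.map (fun i => PySem.Int.toChars (pvD x y (((o : Int) + (k : Int) - 1 - i).toNat)))
      (PySem.List.pyRange 0 (k : Int) 1)).flatten = pvW x y o k := by
  induction k generalizing o with
  | zero => rw [PySem.List.pyRange_one_eq_nil (by omega)]; rfl
  | succ k ih =>
    have hsucc : ((k + 1 : Nat) : Int) = (k : Int) + 1 := by push_cast; ring
    rw [hsucc, PySem.List.pyRange_one_succ_right (by omega), List.map_append,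
      List.flatten_append]
    have hoff : ((o : Int) + ((k : Int) + 1) - 1) = ((o + 1 : Nat) : Int) + (k : Int) - 1 := by
      push_cast
      ring
    rw [hoff, ih (o + 1)]
    have hlast : (((o + 1 : Nat) : Int) + (k : Int) - 1 - (k : Int)).toNat = o := by omega
    simp only [List.map_cons, List.map_nil, List.flatten_cons, List.flatten_nil,
      List.append_nil, hlast]
    rw [← pvW_low]

theorem pvFlatten0 (x y : Int) (k : Nat) :
    (List.map (fun i => PySem.Int.toChars (pvD x y (((k : Int) - 1 - i).toNat)))
      (PySem.List.pyRange 0 (k : Int) 1)).flatten = pvW x y 0 k := by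
  have hf := pvFlatten x y k 0
  simpa using hf

-- ===== VERDICT (by name: the statement is the Claim_ definition above) =====
theorem x_y_lod_to_qk_spec : Claim_equal_x_y_lod_to_qk := by
  intro x y lod _
  unfold Spec_x_y_lod_to_qk x_y_lod_to_qk x_y_lod_to_qk_alt
  by_cases h : lod ≤ 0
  · rw [PySem.List.pyRange_neg_one_eq_nil h, if_pos h]
    rfl
  · rw [not_le] at h
    have hL : (0:Nat) < lod.toNat := by omega
    have hki : lod = ((lod.toNat : Nat) : Int) := (Int.toNat_of_nonneg h.le).symm
    rw [hki, pvA_fold x y lod.toNat [], if_neg (by omega)]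
    simp only [Int.shiftLeft_natCast_right, Int.shiftLeft_eq, Int.toNat_natCast, one_mul, List.nil_append]
    rw [pvBandMask x lod.toNat, pvBandMask y lod.toNat]
    simp only [PySem.Int.toBinChars]
    rw [if_neg (not_lt.mpr (Int.emod_nonneg x (by positivity))),
      if_neg (not_lt.mpr (Int.emod_nonneg y (by positivity))),
      pvToDigits_eq, pvToDigits_eq]
    have hbound : ∀ z : Int, (z % (2:Int) ^ lod.toNat).toNat < 2 ^ lod.toNat := by
      intro z
      have h1 := Int.emod_lt_of_pos z (show (0:Int) < 2 ^ lod.toNat by positivity)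
      have h2 : ((2:Int) ^ lod.toNat) = ((2 ^ lod.toNat : ℕ) : Int) := by push_cast; ring
      omega
    rw [pvZfill _ _ hL (hbound x), pvZfill _ _ hL (hbound y),
      PySem.List.foldl_append_singleton_eq_map, List.nil_append]
    rw [List.map_congr_left (fun i hi => ?_), pvFlatten0 x y lod.toNat]
    rw [PySem.List.mem_pyRange_one] at hi
    show PySem.Int.toChars _ = PySem.Int.toChars (pvD x y (((lod.toNat : Int) - 1 - i).toNat))
    refine congrArg _ ?_
    rw [pvCharDigit x lod.toNat i hi.1 hi.2 hL, pvCharDigit y lod.toNat i hi.1 hi.2 hL]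
    rfl
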